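-- pv_equiv track=rewrite | github.com/yurynamgung/Markov-Text-Generator | MarkovGenerator.py | markov_model
-- ===== SOURCE A (Python) =====
-- punctuations = ['.', '?', '!']
--
-- def dollarify(wordList, k):
--     dollarList = ['$']*k
--     finList = ['$']*k
--     #insert dollarList between sentences
--     for i in range(0, len(wordList)):
--         finList.append(wordList[i])
--         if wordList[i][-1] in punctuations:
--             finList+= dollarList
--     return finList
--
-- def markov_model(wordList, k):
--     dict = {} #make new dictionary
--     dWordList = dollarify(wordList, k)
--
--     """go thru dWordList assigning key, next word is assigned to that key
--     if the assigned word has a punctuation, the next key is $ (not that word)"""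
--     keyCount = 0
--     while keyCount < len(dWordList) - k:
--         #make tuple for dict value
--         tup = ()
--         for word in range(keyCount, keyCount+k):
--             tup += (dWordList[word],)
--         assignedWord = dWordList[keyCount + k] #the word correlating w key
--
--         if tup in dict:
--             dict[tup].append(assignedWord)
--         else:
--             dict[tup] = [assignedWord]
--
--         #skip assignedWords w punctions
--         if assignedWord[-1] in punctuations:
--             keyCount += k
--         keyCount += 1
--     return dict
-- ===== SOURCE B (Python) =====
-- punctuations = ['.', '?', '!']
--
-- def markov_model(wordList, k):
--     # split the word list into sentences: a word ending in punctuation closes one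
--     sentences = []
--     current = []
--     for word in wordList:
--         current.append(word)
--         if word[-1] in punctuations:
--             sentences.append(current)
--             current = []
--     if current:
--         sentences.append(current)
--     # per sentence, slide a k-word window that starts as k dollars
--     d = {}
--     for sentence in sentences:
--         window = ('$',) * k
--         for word in sentence:
--             if window in d:
--                 d[window].append(word)
--             else:
--                 d[window] = [word]
--             window = (window + (word,))[1:]
--     return d
-- ===== Notes on version B (the rewrite author's own statement) =====
-- stated objective: alternative
-- what changed: B splits the word list into sentences and slides a k-word window (seeded with k dollars) through each, instead of A's flat dollar-padded stream scanned by an index while-loop with per-key slicing and a skip-over-the-dollars jump.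
-- outside the precondition, e.g. on markov_model(['a', 'b'], -1): A returns {(): ['b', 'a', 'b']}, B returns {(): ['a', 'b']}
import Mathlib
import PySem

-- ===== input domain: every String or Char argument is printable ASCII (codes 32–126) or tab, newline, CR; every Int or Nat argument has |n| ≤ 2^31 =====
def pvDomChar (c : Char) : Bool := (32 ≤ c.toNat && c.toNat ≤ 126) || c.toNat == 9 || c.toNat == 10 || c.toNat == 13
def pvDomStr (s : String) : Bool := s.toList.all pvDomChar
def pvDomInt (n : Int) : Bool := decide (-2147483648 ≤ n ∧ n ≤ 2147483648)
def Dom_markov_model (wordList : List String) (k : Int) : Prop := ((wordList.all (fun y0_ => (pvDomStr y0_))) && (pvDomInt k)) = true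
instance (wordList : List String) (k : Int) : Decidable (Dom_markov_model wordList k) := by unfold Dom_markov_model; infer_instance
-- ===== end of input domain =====

-- B: builds the same k-gram model by splitting into sentences and sliding a k-word window, instead of A's padded flat stream with index arithmetic; alternative decomposition, same cost.


-- ===== PORT A =====
def punctuations : List String := [".", "?", "!"]

-- w[-1] in punctuations; on the empty string Python raises IndexError (excluded by Pre_), here `false`
def lastIsPunct (w : String) : Bool :=
  match PySem.Str.pyGet? w (-1) with
  | some c => punctuations.contains (String.ofList [c])
  | none => false

-- the shared 'if tup in dict: append else: new [a]' update both Pythons perform verbatim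
def dictAppend (d : PySem.Dict (List String) (List String)) (tup : List String) (a : String) :
    PySem.Dict (List String) (List String) :=
  match PySem.Dict.get? d tup with
  | some v => PySem.Dict.insert d tup (v ++ [a])
  | none => PySem.Dict.insert d tup [a]

def dollarify (wordList : List String) (k : Int) : List String :=
  -- dollarList = ['$'] * k = List.replicate k.toNat "$"
  wordList.foldl (fun finList w =>
    let finList := finList ++ [w]
    if lastIsPunct w then finList ++ List.replicate k.toNat "$" else finList)
    (List.replicate k.toNat "$")

-- A's while-loop; fuel = |dWordList| suffices whenever 0 ≤ k (Pre_); the `.getD ""` / `=> d`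
-- branches correspond to IndexError in Python and are unreachable under Pre_
def markovLoop (dW : List String) (k : Int) :
    Nat → Int → PySem.Dict (List String) (List String) → PySem.Dict (List String) (List String)
  | 0, _, d => d
  | fuel+1, keyCount, d =>
    if keyCount < (dW.length : Int) - k then
      let tup := (PySem.List.pyRange keyCount (keyCount + k) 1).foldl
        (fun acc i => acc ++ [(PySem.List.pyGet? dW i).getD ""]) []
      match PySem.List.pyGet? dW (keyCount + k) with
      | none => d
      | some assignedWord =>
        markovLoop dW k fuel
          (if lastIsPunct assignedWord then keyCount + k + 1 else keyCount + 1)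
          (dictAppend d tup assignedWord)
    else d

def markov_model (wordList : List String) (k : Int) : List (List String × List String) :=
  (markovLoop (dollarify wordList k) k (dollarify wordList k).length 0 PySem.Dict.empty).items

-- ===== PORT B =====
def splitSentences (wordList : List String) : List (List String) × List String :=
  wordList.foldl (fun p word =>
      let current := p.2 ++ [word]
      if lastIsPunct word then (p.1 ++ [current], ([] : List String)) else (p.1, current))
    ([], [])

def emitStep (st : PySem.Dict (List String) (List String) × List String) (word : String) :
    PySem.Dict (List String) (List String) × List String :=
  (dictAppend st.1 st.2 word, (st.2 ++ [word]).drop 1)   -- window = (window + (word,))[1:]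

def emitSentence (k : Int) (d : PySem.Dict (List String) (List String)) (sentence : List String) :
    PySem.Dict (List String) (List String) :=
  (sentence.foldl emitStep (d, List.replicate k.toNat "$")).1

def markov_model_alt (wordList : List String) (k : Int) : List (List String × List String) :=
  ((if (splitSentences wordList).2.isEmpty then (splitSentences wordList).1
    else (splitSentences wordList).1 ++ [(splitSentences wordList).2]).foldl
      (emitSentence k) PySem.Dict.empty).items

-- ===== PRECONDITION & SPEC =====
-- Pre_ excludes negative k (there A wraps indices around the end and loops forever as soon as a
-- sentence terminator occurs) and empty-string words (on which A raises IndexError at w[-1]).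
def Pre_markov_model (wordList : List String) (k : Int) : Prop :=
  0 ≤ k ∧ ∀ w ∈ wordList, w ≠ ""
instance (wordList : List String) (k : Int) : Decidable (Pre_markov_model wordList k) := by
  unfold Pre_markov_model; infer_instance

def pvWitness_markov_model : List String × Int := (["a", "b.", "c"], 2)

def Spec_markov_model (wordList : List String) (k : Int) (out : List (List String × List String)) : Prop := out = markov_model_alt wordList k
instance (wordList : List String) (k : Int) (out : List (List String × List String)) : Decidable (Spec_markov_model wordList k out) := by unfold Spec_markov_model; infer_instance

-- ===== CLAIM (what is proved, stated in full; the proofs are below) =====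
def Claim_equal_markov_model : Prop := ∀ (wordList : List String) (k : Int), Dom_markov_model wordList k → Pre_markov_model wordList k → Spec_markov_model wordList k (markov_model wordList k)

-- ===== LEMMAS AND PROOFS =====

-- A's loop rewritten on the suffix of the stream (proof-level only)
def loopRel (k : Nat) (L : List String) (d : PySem.Dict (List String) (List String)) :
    PySem.Dict (List String) (List String) :=
  if h : k < L.length then
    let a := L.getD k ""
    let d' := dictAppend d (L.take k) a
    if lastIsPunct a then loopRel k (L.drop (k+1)) d'
    else loopRel k (L.drop 1) d'
  else d
  termination_by L.length
  decreasing_by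
  · simp only [List.length_drop]; omega
  · simp only [List.length_drop]; omega

-- the tuple-building inner for-loop is take
lemma tup_eq (dW : List String) : ∀ (n kc : Nat) (init : List String), kc + n ≤ dW.length →
    (PySem.List.pyRange (kc : Int) ((kc : Int) + (n : Int)) 1).foldl
      (fun acc i => acc ++ [(PySem.List.pyGet? dW i).getD ""]) init
    = init ++ (dW.drop kc).take n := by
  intro n
  induction n with
  | zero => intro kc init h; simp [PySem.List.pyRange_one_eq_nil]
  | succ n ih =>
    intro kc init h
    have h1 : (kc : Int) ≤ (kc : Int) + (n : Int) := by omega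
    have : ((kc : Int) + ((n : Nat) + 1 : Nat)) = ((kc : Int) + (n : Int)) + 1 := by push_cast; ring
    rw [this, PySem.List.pyRange_one_succ_right h1, List.foldl_append, ih kc init (by omega)]
    have hcast : (kc : Int) + (n : Int) = ((kc + n : Nat) : Int) := by push_cast; ring
    have hlt : kc + n < dW.length := by omega
    simp only [List.foldl_cons, List.foldl_nil, hcast, PySem.List.pyGet?_natCast]
    rw [List.getElem?_eq_getElem hlt]
    have : (dW.drop kc).take (n+1) = (dW.drop kc).take n ++ [dW[kc+n]] := by
      rw [List.take_add_one]
      congr 1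
      rw [List.getElem?_drop, List.getElem?_eq_getElem hlt]
      rfl
    rw [this, List.append_assoc]
    rfl

-- A's fueled absolute-index loop equals the suffix loop
lemma markovLoop_eq_loopRel (dW : List String) (k : Int) (hk : 0 ≤ k) :
    ∀ (fuel : Nat) (kc : Int) (d : PySem.Dict (List String) (List String)),
      0 ≤ kc → dW.length ≤ fuel + kc.toNat →
      markovLoop dW k fuel kc d = loopRel k.toNat (dW.drop kc.toNat) d := by
  intro fuel
  induction fuel with
  | zero =>
    intro kc d hkc hfuel
    rw [markovLoop, loopRel]
    rw [dif_neg]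
    simp only [List.length_drop]
    omega
  | succ fuel ih =>
    intro kc d hkc hfuel
    rw [markovLoop]
    by_cases hcond : kc < (dW.length : Int) - k
    · rw [if_pos hcond]
      have hkc' : kc = ((kc.toNat : Nat) : Int) := by omega
      have hk' : k = ((k.toNat : Nat) : Int) := by omega
      have hle : kc.toNat + k.toNat < dW.length := by omega
      have htup : (PySem.List.pyRange kc (kc + k) 1).foldl
          (fun acc i => acc ++ [(PySem.List.pyGet? dW i).getD ""]) []
          = (dW.drop kc.toNat).take k.toNat := by
        conv_lhs => rw [hkc', hk']
        rw [tup_eq dW k.toNat kc.toNat [] (by omega)]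
        simp
      have hget : PySem.List.pyGet? dW (kc + k) = some dW[kc.toNat + k.toNat] := by
        have hcast : kc + k = ((kc.toNat + k.toNat : Nat) : Int) := by omega
        rw [hcast, PySem.List.pyGet?_natCast, List.getElem?_eq_getElem hle]
      rw [htup, hget]
      have ha : dW[kc.toNat + k.toNat] = (dW.drop kc.toNat).getD k.toNat "" := by
        rw [List.getD_eq_getElem?_getD, List.getElem?_drop, List.getElem?_eq_getElem hle]
        rfl
      rw [loopRel]
      rw [dif_pos (by simp only [List.length_drop]; omega)]
      simp only [← ha]
      by_cases hp : lastIsPunct dW[kc.toNat + k.toNat]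
      · rw [if_pos hp, if_pos hp, ih (kc + k + 1) _ (by omega) (by omega)]
        have : (kc + k + 1).toNat = kc.toNat + (k.toNat + 1) := by omega
        rw [this, ← List.drop_drop]
      · rw [if_neg hp, if_neg hp, ih (kc + 1) _ (by omega) (by omega)]
        have : (kc + 1).toNat = kc.toNat + 1 := by omega
        rw [this, ← List.drop_drop]
    · rw [if_neg hcond, loopRel, dif_neg]
      simp only [List.length_drop]
      omega

-- dollarify is a flatMap
lemma dollarify_flatMap (k : Int) : ∀ (wordList : List String) (fin : List String),
    wordList.foldl (fun finList w =>
      let finList := finList ++ [w]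
      if lastIsPunct w then finList ++ List.replicate k.toNat "$" else finList) fin
    = fin ++ wordList.flatMap (fun w => w :: (if lastIsPunct w then List.replicate k.toNat "$" else [])) := by
  intro wordList
  induction wordList with
  | nil => intro fin; simp
  | cons w ws ih =>
    intro fin
    simp only [List.foldl_cons, List.flatMap_cons, ih]
    by_cases hp : lastIsPunct w <;> simp [hp]

-- the split's sentences flatten back to the dollarified body
lemma split_flatMap (k : Int) : ∀ (wordList : List String) (T : List (List String)) (cur : List String),
    (wordList.foldl (fun p word =>
        let current := p.2 ++ [word]
        if lastIsPunct word then (p.1 ++ [current], ([] : List String)) else (p.1, current)) (T, cur)).1.flatMap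
        (fun s => s ++ List.replicate k.toNat "$")
      ++ (wordList.foldl (fun p word =>
        let current := p.2 ++ [word]
        if lastIsPunct word then (p.1 ++ [current], ([] : List String)) else (p.1, current)) (T, cur)).2
    = T.flatMap (fun s => s ++ List.replicate k.toNat "$") ++ cur
      ++ wordList.flatMap (fun w => w :: (if lastIsPunct w then List.replicate k.toNat "$" else [])) := by
  intro wordList
  induction wordList with
  | nil => intro T cur; simp
  | cons w ws ih =>
    intro T cur
    simp only [List.foldl_cons, List.flatMap_cons]
    by_cases hp : lastIsPunct w
    · simp only [hp, if_true, ih]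
      simp
    · simp only [hp, ih]
      simp

def SentOK (s : List String) : Prop :=
  ∃ u a, s = u ++ [a] ∧ (∀ w ∈ u, lastIsPunct w = false) ∧ lastIsPunct a = true

-- the split produces well-formed sentences and an unterminated tail
lemma split_wf : ∀ (wordList : List String) (T : List (List String)) (cur : List String),
    (∀ s ∈ T, SentOK s) → (∀ w ∈ cur, lastIsPunct w = false) →
    (∀ s ∈ (wordList.foldl (fun p word =>
        let current := p.2 ++ [word]
        if lastIsPunct word then (p.1 ++ [current], ([] : List String)) else (p.1, current)) (T, cur)).1, SentOK s)
    ∧ (∀ w ∈ (wordList.foldl (fun p word =>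
        let current := p.2 ++ [word]
        if lastIsPunct word then (p.1 ++ [current], ([] : List String)) else (p.1, current)) (T, cur)).2, lastIsPunct w = false) := by
  intro wordList
  induction wordList with
  | nil => intro T cur hT hcur; exact ⟨hT, hcur⟩
  | cons w ws ih =>
    intro T cur hT hcur
    simp only [List.foldl_cons]
    by_cases hp : lastIsPunct w
    · simp only [hp, if_true]
      refine ih _ _ ?_ (by simp)
      intro s hs
      rcases List.mem_append.1 hs with h | h
      · exact hT s h
      · rw [List.mem_singleton] at h
        exact h ▸ ⟨cur, w, rfl, hcur, hp⟩
    · simp only [hp]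
      refine ih _ _ hT ?_
      intro x hx
      rcases List.mem_append.1 hx with h | h
      · exact hcur x h
      · rw [List.mem_singleton] at h; exact h ▸ (by simpa using hp)

-- the trailing (unterminated) words: the loop ends exactly after emitting them
lemma loopRel_trailing (k : Nat) : ∀ (t c : List String) (d),
    c.length = k → (∀ w ∈ t, lastIsPunct w = false) →
    loopRel k (c ++ t) d = (t.foldl emitStep (d, c)).1 := by
  intro t
  induction t with
  | nil =>
    intro c d hc _
    rw [loopRel, dif_neg (by simp [hc])]
    rfl
  | cons w t' ih =>
    intro c d hc hnp
    have hlen : k < (c ++ w :: t').length := by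
      simp only [List.length_append, List.length_cons, hc]; omega
    rw [loopRel, dif_pos hlen]
    have htake : (c ++ w :: t').take k = c := List.take_left' hc
    have hget : (c ++ w :: t').getD k "" = w := by
      rw [List.getD_eq_getElem?_getD, List.getElem?_append_right (by omega), hc]
      simp
    rw [htake, hget, if_neg (by simp [hnp w (by simp)])]
    have hdrop : (c ++ w :: t').drop 1 = (c ++ [w]).drop 1 ++ t' := by
      have : c ++ w :: t' = (c ++ [w]) ++ t' := by simp
      rw [this, List.drop_append_of_le_length (by simp)]
    rw [hdrop, ih _ _ (by simp [hc]) (fun x hx => hnp x (by simp [hx]))]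
    rfl

-- a terminated sentence: the loop emits it then jumps to the next dollar block
lemma loopRel_sentence (k : Nat) : ∀ (u : List String) (a : String) (c : List String) (d R),
    c.length = k → (∀ w ∈ u, lastIsPunct w = false) → lastIsPunct a = true →
    loopRel k (c ++ (u ++ [a]) ++ List.replicate k "$" ++ R) d
    = loopRel k (List.replicate k "$" ++ R) ((u ++ [a]).foldl emitStep (d, c)).1 := by
  intro u
  induction u with
  | nil =>
    intro a c d R hc _ hpa
    have hlen : k < (c ++ ([] ++ [a]) ++ List.replicate k "$" ++ R).length := by
      simp only [List.length_append, List.length_cons, List.length_replicate, List.length_nil, hc]; omega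
    rw [loopRel, dif_pos hlen]
    have htake : (c ++ ([] ++ [a]) ++ List.replicate k "$" ++ R).take k = c := by
      rw [List.append_assoc, List.append_assoc]
      exact List.take_left' hc
    have hget : (c ++ ([] ++ [a]) ++ List.replicate k "$" ++ R).getD k "" = a := by
      rw [List.append_assoc, List.append_assoc, List.getD_eq_getElem?_getD,
        List.getElem?_append_right (by omega), hc]
      simp
    rw [htake, hget, if_pos hpa]
    have hdrop : (c ++ ([] ++ [a]) ++ List.replicate k "$" ++ R).drop (k+1)
        = List.replicate k "$" ++ R := by
      have : c ++ ([] ++ [a]) ++ List.replicate k "$" ++ R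
          = (c ++ [a]) ++ (List.replicate k "$" ++ R) := by simp
      rw [this, List.drop_append_of_le_length (by simp [hc])]
      simp [hc]
    rw [hdrop]
    rfl
  | cons w u' ih =>
    intro a c d R hc hnp hpa
    have hlen : k < (c ++ ((w :: u') ++ [a]) ++ List.replicate k "$" ++ R).length := by
      simp only [List.length_append, List.length_cons, List.length_replicate, hc]; omega
    rw [loopRel, dif_pos hlen]
    have htake : (c ++ ((w :: u') ++ [a]) ++ List.replicate k "$" ++ R).take k = c := by
      rw [List.append_assoc, List.append_assoc]
      exact List.take_left' hc
    have hget : (c ++ ((w :: u') ++ [a]) ++ List.replicate k "$" ++ R).getD k "" = w := by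
      rw [List.append_assoc, List.append_assoc, List.getD_eq_getElem?_getD,
        List.getElem?_append_right (by omega), hc]
      simp
    rw [htake, hget, if_neg (by simp [hnp w (by simp)])]
    have hdrop : (c ++ ((w :: u') ++ [a]) ++ List.replicate k "$" ++ R).drop 1
        = ((c ++ [w]).drop 1) ++ (u' ++ [a]) ++ List.replicate k "$" ++ R := by
      have : c ++ ((w :: u') ++ [a]) ++ List.replicate k "$" ++ R
          = (c ++ [w]) ++ ((u' ++ [a]) ++ (List.replicate k "$" ++ R)) := by simp
      rw [this, List.drop_append_of_le_length (by simp)]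
      simp
    rw [hdrop, ih a _ _ R (by simp [hc]) (fun x hx => hnp x (by simp [hx])) hpa]
    rfl

-- the whole stream: one sentence block at a time, then the trailing words
lemma loopRel_assemble (k : Nat) (t : List String) (hnt : ∀ w ∈ t, lastIsPunct w = false) :
    ∀ (T : List (List String)) (d), (∀ s ∈ T, SentOK s) →
    loopRel k (List.replicate k "$" ++ (T.flatMap (fun s => s ++ List.replicate k "$") ++ t)) d
    = (t.foldl emitStep
        (T.foldl (fun d s => (s.foldl emitStep (d, List.replicate k "$")).1) d,
         List.replicate k "$")).1 := by
  intro T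
  induction T with
  | nil =>
    intro d _
    simpa using loopRel_trailing k t (List.replicate k "$") d (by simp) hnt
  | cons s T' ih =>
    intro d hT
    rcases hT s (by simp) with ⟨u, a, hs, hu, hpa⟩
    have : List.replicate k "$" ++ ((s :: T').flatMap (fun s => s ++ List.replicate k "$") ++ t)
        = List.replicate k "$" ++ (u ++ [a]) ++ List.replicate k "$"
          ++ (T'.flatMap (fun s => s ++ List.replicate k "$") ++ t) := by
      simp [hs]
    rw [this, loopRel_sentence k u a _ d _ (by simp) hu hpa,
      ih _ (fun x hx => hT x (by simp [hx]))]
    simp [hs]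

-- ===== VERDICT (by name: the statement is the Claim_ definition above) =====
theorem markov_model_spec : Claim_equal_markov_model := by
  intro wordList k _ hpre
  obtain ⟨hk, _⟩ := hpre
  show markov_model wordList k = markov_model_alt wordList k
  have hloop : markovLoop (dollarify wordList k) k (dollarify wordList k).length 0 PySem.Dict.empty
      = loopRel k.toNat (dollarify wordList k) PySem.Dict.empty := by
    have := markovLoop_eq_loopRel (dollarify wordList k) k hk (dollarify wordList k).length 0
      PySem.Dict.empty (by omega) (by simp)
    simpa using this
  have hstream : dollarify wordList k
      = List.replicate k.toNat "$"
        ++ ((splitSentences wordList).1.flatMap (fun s => s ++ List.replicate k.toNat "$")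
            ++ (splitSentences wordList).2) := by
    rw [dollarify, dollarify_flatMap k wordList]
    unfold splitSentences
    have := split_flatMap k wordList [] []
    simp only [List.flatMap_nil, List.nil_append] at this
    rw [this]
  have hwf := split_wf wordList [] [] (by simp) (by simp)
  
  have hmain := loopRel_assemble k.toNat (splitSentences wordList).2
    (by unfold splitSentences; exact hwf.2)
    (splitSentences wordList).1 PySem.Dict.empty (by unfold splitSentences; exact hwf.1)
  have hfun : (fun d s => (s.foldl emitStep (d, List.replicate k.toNat "$")).1) = emitSentence k := by
    funext d s; rfl
  rw [markov_model, markov_model_alt, hloop, hstream, hmain, hfun]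
  congr 1
  by_cases ht : (splitSentences wordList).2.isEmpty
  · rw [if_pos ht]
    rw [List.isEmpty_iff] at ht
    rw [ht, List.foldl_nil]
  · rw [if_neg ht, List.foldl_append, List.foldl_cons, List.foldl_nil]
    rfl
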